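-- pv_equiv track=rewrite | github.com/pondycrane/algorithms | python/dp/zero_sum_games/gold_of_the_game.py | gold_of_the_game
-- ===== SOURCE A (Python) =====
-- from typing import List
--
-- def gold_of_the_game(bags: List[int]) -> int:
--     dp = [[0] * len(bags) for _ in range(len(bags))]
--     for d in range(1, len(dp) + 1):
--         for l in range(len(dp) - d + 1):
--             r = l + d - 1
--             if r == l:
--                 dp[l][r] = bags[l]
--             elif r == l + 1:
--                 dp[l][r] = max(dp[l][r - 1], dp[l + 1][r])
--             else:
--                 dp[l][r] = max(
--                     bags[l] + min(dp[l + 2][r], dp[l + 1][r - 1]),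
--                     bags[r] + min(dp[l][r - 2], dp[l + 1][r - 1]),
--                 )
--     return dp[0][len(bags) - 1]
-- ===== SOURCE B (Python) =====
-- from functools import lru_cache
-- from typing import List
--
--
-- def gold_of_the_game(bags: List[int]) -> int:
--     @lru_cache(maxsize=None)
--     def solve(l: int, r: int) -> int:
--         if l == r:
--             return bags[l]
--         if r == l + 1:
--             return max(bags[l], bags[r])
--         return max(
--             bags[l] + min(solve(l + 2, r), solve(l + 1, r - 1)),
--             bags[r] + min(solve(l, r - 2), solve(l + 1, r - 1)),
--         )
--     return solve(0, len(bags) - 1)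
-- ===== Notes on version B (the rewrite author's own statement) =====
-- stated objective: alternative
-- what changed: Replaced the bottom-up O(n^2) table filled diagonal by diagonal with a top-down memoized recursion on the interval (l, r); no table is allocated and only reachable subproblems are computed.
-- outside the precondition, e.g. on gold_of_the_game([]): A raises IndexError, B raises IndexError
import Mathlib
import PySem

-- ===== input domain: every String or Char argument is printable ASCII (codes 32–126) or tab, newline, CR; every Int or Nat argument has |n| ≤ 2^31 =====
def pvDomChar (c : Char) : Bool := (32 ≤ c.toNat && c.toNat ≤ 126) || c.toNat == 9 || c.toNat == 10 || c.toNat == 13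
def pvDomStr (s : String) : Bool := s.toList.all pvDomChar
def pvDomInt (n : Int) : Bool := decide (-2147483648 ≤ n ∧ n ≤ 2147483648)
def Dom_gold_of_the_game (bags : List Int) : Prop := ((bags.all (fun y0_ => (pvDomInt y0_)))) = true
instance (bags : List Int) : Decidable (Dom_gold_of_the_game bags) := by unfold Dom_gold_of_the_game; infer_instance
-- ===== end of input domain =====

-- B replaces A's bottom-up diagonal DP table with a top-down recursion on the
-- interval (l, r) (memoized in Python); same values, different decomposition.


-- ===== PORT A =====
-- dp[l][r] read/write on the list-of-lists table; indices are always in range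
-- in A's loops (under Pre_), so getD 0 is exact there.
def pvGet (dp : List (List Int)) (l r : Nat) : Int := (dp.getD l []).getD r 0

def pvSet (dp : List (List Int)) (l r : Nat) (v : Int) : List (List Int) :=
  dp.set l ((dp.getD l []).set r v)

-- body of A's inner loop over l, for diagonal d
def pvStep (bags : List Int) (d : Nat) (dp : List (List Int)) (l : Nat) : List (List Int) :=
  let r := l + d - 1
  if r = l then pvSet dp l r (bags.getD l 0)
  else if r = l + 1 then pvSet dp l r (max (pvGet dp l (r - 1)) (pvGet dp (l + 1) r))
  else pvSet dp l r (max
    (bags.getD l 0 + min (pvGet dp (l + 2) r) (pvGet dp (l + 1) (r - 1)))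
    (bags.getD r 0 + min (pvGet dp l (r - 2)) (pvGet dp (l + 1) (r - 1))))

-- range(1, n+1) is transliterated as List.range n with d = d' + 1
def gold_of_the_game (bags : List Int) : Int :=
  let n := bags.length
  let dp0 := List.replicate n (List.replicate n (0 : Int))
  let dp := (List.range n).foldl
    (fun dp d' => (List.range (n - (d' + 1) + 1)).foldl (pvStep bags (d' + 1)) dp) dp0
  pvGet dp 0 (n - 1)

-- ===== PORT B =====
-- top-down recursion of Source B's solve(l, r); the r ≤ l guard coincides with
-- l == r on every reachable call (l ≤ r throughout) and gives termination
def goldSolve (bags : List Int) (l r : Nat) : Int :=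
  if r ≤ l then bags.getD l 0
  else if r = l + 1 then max (bags.getD l 0) (bags.getD r 0)
  else max
    (bags.getD l 0 + min (goldSolve bags (l + 2) r) (goldSolve bags (l + 1) (r - 1)))
    (bags.getD r 0 + min (goldSolve bags l (r - 2)) (goldSolve bags (l + 1) (r - 1)))
termination_by r - l
decreasing_by all_goals omega

def gold_of_the_game_alt (bags : List Int) : Int := goldSolve bags 0 (bags.length - 1)

-- ===== PRECONDITION & SPEC =====
-- A raises IndexError on [] (dp[0] on the empty table); excluded.
def Pre_gold_of_the_game (bags : List Int) : Prop := bags ≠ []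
instance (bags : List Int) : Decidable (Pre_gold_of_the_game bags) := by
  unfold Pre_gold_of_the_game; infer_instance

def pvWitness_gold_of_the_game : List Int := [3, 1, 5, 2]

def Spec_gold_of_the_game (bags : List Int) (out : Int) : Prop := out = gold_of_the_game_alt bags
instance (bags : List Int) (out : Int) : Decidable (Spec_gold_of_the_game bags out) := by unfold Spec_gold_of_the_game; infer_instance

-- ===== CLAIM (what is proved, stated in full; the proofs are below) =====
def Claim_equal_gold_of_the_game : Prop := ∀ (bags : List Int), Dom_gold_of_the_game bags → Pre_gold_of_the_game bags → Spec_gold_of_the_game bags (gold_of_the_game bags)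

-- ===== LEMMAS AND PROOFS =====

-- well-formedness of the table: n rows of length n
def pvWF (n : Nat) (dp : List (List Int)) : Prop :=
  dp.length = n ∧ ∀ row ∈ dp, row.length = n

-- invariant after all diagonals of size ≤ k have been filled
def pvInv (bags : List Int) (k : Nat) (dp : List (List Int)) : Prop :=
  pvWF bags.length dp ∧
    ∀ l r : Nat, l ≤ r → r < bags.length → r + 1 - l ≤ k →
      pvGet dp l r = goldSolve bags l r

lemma pvGetD_of_lt {α : Type} (xs : List α) (i : Nat) (d : α) (h : i < xs.length) :
    xs.getD i d = xs[i] := by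
  rw [List.getD_eq_getElem?_getD, List.getElem?_eq_getElem h]; rfl

lemma pvWF_set {n : Nat} {dp : List (List Int)} (h : pvWF n dp) (l r : Nat) (v : Int) :
    pvWF n (pvSet dp l r v) := by
  obtain ⟨h1, h2⟩ := h
  by_cases hl : l < dp.length
  · refine ⟨by simp [pvSet, h1], ?_⟩
    intro row hrow
    rcases List.mem_or_eq_of_mem_set hrow with hmem | heq
    · exact h2 row hmem
    · subst heq
      rw [List.length_set, pvGetD_of_lt _ _ _ hl]
      exact h2 _ (List.getElem_mem hl)
  · rw [pvSet, List.set_eq_of_length_le (by omega)]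
    exact ⟨h1, h2⟩

lemma pvSet_getD_row {dp : List (List Int)} {l : Nat} (hl : l < dp.length) (r : Nat) (v : Int) :
    (dp.set l ((dp.getD l []).set r v)).getD l [] = (dp.getD l []).set r v := by
  rw [pvGetD_of_lt _ _ _ (by simpa using hl)]
  exact List.getElem_set_self (by simpa using hl)

lemma pvGet_pvSet_same {n : Nat} {dp : List (List Int)} (h : pvWF n dp)
    {l r : Nat} (hl : l < n) (hr : r < n) (v : Int) :
    pvGet (pvSet dp l r v) l r = v := by
  obtain ⟨h1, h2⟩ := h
  have hl' : l < dp.length := by omega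
  have hrowlen : (dp.getD l []).length = n := by
    rw [pvGetD_of_lt _ _ _ hl']; exact h2 _ (List.getElem_mem hl')
  unfold pvGet pvSet
  rw [pvSet_getD_row hl']
  rw [pvGetD_of_lt _ _ _ (by rw [List.length_set, hrowlen]; omega)]
  exact List.getElem_set_self (by rw [List.length_set, hrowlen]; omega)

lemma pvGet_pvSet_ne {dp : List (List Int)} {l r l' r' : Nat}
    (h : l ≠ l' ∨ r ≠ r') (v : Int) :
    pvGet (pvSet dp l r v) l' r' = pvGet dp l' r' := by
  by_cases hl : l < dp.length
  · rcases h with h | h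
    · unfold pvGet pvSet
      simp only [List.getD_eq_getElem?_getD]
      rw [List.getElem?_set_ne h]
    · by_cases hll : l = l'
      · subst hll
        unfold pvGet pvSet
        rw [pvSet_getD_row hl]
        simp only [List.getD_eq_getElem?_getD]
        rw [List.getElem?_set_ne h]
      · unfold pvGet pvSet
        simp only [List.getD_eq_getElem?_getD]
        rw [List.getElem?_set_ne hll]
  · unfold pvSet
    rw [List.set_eq_of_length_le (by omega)]

lemma goldSolve_base {bags : List Int} {l : Nat} : goldSolve bags l l = bags.getD l 0 := by
  rw [goldSolve]; simp

lemma goldSolve_two {bags : List Int} {l : Nat} :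
    goldSolve bags l (l + 1) = max (bags.getD l 0) (bags.getD (l + 1) 0) := by
  rw [goldSolve]; simp

lemma goldSolve_step {bags : List Int} {l r : Nat} (h : l + 2 ≤ r) :
    goldSolve bags l r = max
      (bags.getD l 0 + min (goldSolve bags (l + 2) r) (goldSolve bags (l + 1) (r - 1)))
      (bags.getD r 0 + min (goldSolve bags l (r - 2)) (goldSolve bags (l + 1) (r - 1))) := by
  rw [goldSolve]
  rw [if_neg (by omega), if_neg (by omega)]

-- inner loop: processing l = 0 .. m-1 on diagonal d = k + 1
lemma pvInner (bags : List Int) (k : Nat) (hk : k < bags.length) :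
    ∀ m, m ≤ bags.length - k → ∀ dp, pvInv bags k dp →
      pvWF bags.length ((List.range m).foldl (pvStep bags (k + 1)) dp) ∧
      (∀ l r : Nat, l ≤ r → r < bags.length → r + 1 - l ≤ k →
        pvGet ((List.range m).foldl (pvStep bags (k + 1)) dp) l r = goldSolve bags l r) ∧
      (∀ l, l < m →
        pvGet ((List.range m).foldl (pvStep bags (k + 1)) dp) l (l + k) = goldSolve bags l (l + k)) := by
  intro m
  induction m with
  | zero =>
    intro _ dp hdp
    exact ⟨hdp.1, fun l r h1 h2 h3 => hdp.2 l r h1 h2 h3, fun l hl => absurd hl (by omega)⟩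
  | succ m ih =>
    intro hm dp hdp
    have hmn : m + k < bags.length := by omega
    obtain ⟨hWF, hlow, hdiag⟩ := ih (by omega) dp hdp
    set dp' := (List.range m).foldl (pvStep bags (k + 1)) dp with hdp'
    have hfold : (List.range (m + 1)).foldl (pvStep bags (k + 1)) dp
        = pvStep bags (k + 1) dp' m := by
      rw [List.range_succ, List.foldl_append]; rfl
    have hr : m + (k + 1) - 1 = m + k := by omega
    -- the value written at (m, m + k) is goldSolve bags m (m + k)
    have hstep : pvStep bags (k + 1) dp' m = pvSet dp' m (m + k) (goldSolve bags m (m + k)) := by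
      unfold pvStep
      simp only [hr]
      rcases Nat.lt_or_ge k 2 with hk2 | hk2
      · interval_cases k
        · simp only [Nat.add_zero]
          rw [if_pos trivial, goldSolve_base]
        · rw [if_neg (by omega), if_pos rfl]
          simp only [Nat.add_sub_cancel]
          rw [hlow m m le_rfl (by omega) (by omega),
              hlow (m + 1) (m + 1) le_rfl (by omega) (by omega)]
          rw [goldSolve_base, goldSolve_base, goldSolve_two]
      · rw [if_neg (by omega), if_neg (by omega)]
        conv_rhs => rw [goldSolve_step (show m + 2 ≤ m + k by omega)]
        rw [hlow (m + 2) (m + k) (by omega) (by omega) (by omega),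
            hlow (m + 1) (m + k - 1) (by omega) (by omega) (by omega),
            hlow m (m + k - 2) (by omega) (by omega) (by omega)]
    rw [hfold, hstep]
    refine ⟨pvWF_set hWF _ _ _, ?_, ?_⟩
    · intro l r h1 h2 h3
      have hne : m ≠ l ∨ m + k ≠ r := by
        by_cases h : m = l
        · subst h; right; omega
        · exact Or.inl h
      rw [pvGet_pvSet_ne hne _]
      exact hlow l r h1 h2 h3
    · intro l hl
      rcases Nat.lt_or_ge l m with hlm | hlm
      · rw [pvGet_pvSet_ne (Or.inl (by omega)) _]
        exact hdiag l hlm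
      · have : l = m := by omega
        subst this
        exact pvGet_pvSet_same hWF (by omega) (by omega) _

lemma pvOuter (bags : List Int) :
    ∀ k, k ≤ bags.length →
      pvInv bags k ((List.range k).foldl
        (fun dp d' => (List.range (bags.length - (d' + 1) + 1)).foldl (pvStep bags (d' + 1)) dp)
        (List.replicate bags.length (List.replicate bags.length (0 : Int)))) := by
  intro k
  induction k with
  | zero =>
    intro _
    refine ⟨⟨by simp, fun row hrow => ?_⟩, fun l r h1 h2 h3 => absurd h3 (by omega)⟩
    rw [(List.mem_replicate.mp hrow).2]; simp
  | succ k ih =>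
    intro hk
    have hinv := ih (by omega)
    rw [List.range_succ, List.foldl_append]
    simp only [List.foldl_cons, List.foldl_nil]
    have hm : bags.length - (k + 1) + 1 = bags.length - k := by omega
    rw [hm]
    obtain ⟨hWF, hlow, hdiag⟩ := pvInner bags k (by omega) (bags.length - k) le_rfl _ hinv
    refine ⟨hWF, ?_⟩
    intro l r h1 h2 h3
    rcases Nat.lt_or_ge (r + 1 - l) (k + 1) with hs | hs
    · exact hlow l r h1 h2 (by omega)
    · have hr : r = l + k := by omega
      subst hr
      exact hdiag l (by omega)

-- ===== VERDICT (by name: the statement is the Claim_ definition above) =====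
theorem gold_of_the_game_spec : Claim_equal_gold_of_the_game := by
  intro bags _ hpre
  have hn : 0 < bags.length := List.length_pos_iff.mpr hpre
  have h := pvOuter bags bags.length le_rfl
  unfold Spec_gold_of_the_game gold_of_the_game gold_of_the_game_alt
  exact h.2 0 (bags.length - 1) (by omega) (by omega) (by omega)
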